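-- pv_equiv track=rewrite | github.com/Ale083/ProyectosTEC | TallerProgra(py)/Proyecto1PueblosOriginarios/Auxiliar.py | RevisarValoresNivel
-- ===== SOURCE A (Python) =====
-- def RevisarValoresNivel(cultura, autonomia):
--   '''
--   E: Las listas de cultura y autonomia
--   S: Una lista de los niveles de cada comunidad, este reemplazará la lista anterior cuando se llama la función
--   '''
--   if cultura == [] and autonomia == []: #caso de parada.
--     return []
--   elif cultura[0] == 0 or autonomia[0] == 0:
--     return [0] + RevisarValoresNivel(cultura[1:], autonomia[1:])  #Si se pierde, la comunidad es nvl 0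
--   elif (cultura[0] > 0 and cultura[0] <= 25) or (autonomia[0] > 0 and autonomia[0] <= 25): #1-25 = nivel 1
--     return [1] + RevisarValoresNivel(cultura[1:], autonomia[1:])
--   elif (cultura[0] > 25 and cultura[0] <= 50) or (autonomia[0] > 25 and autonomia[0] <= 50): #26-50 = nivel 2
--     return [2] + RevisarValoresNivel(cultura[1:], autonomia[1:])
--   elif (cultura[0] > 50 and cultura[0] <= 75) or (autonomia[0] > 50 and autonomia[0] <= 75): #51-75 = nivel 3
--     return [3] + RevisarValoresNivel(cultura[1:], autonomia[1:])
--   elif (cultura[0] > 75 and cultura[0] <= 100) or (autonomia[0] > 75 and autonomia[0] <= 100): #76-100 = nivel 4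
--     return [4] + RevisarValoresNivel(cultura[1:], autonomia[1:])
--   elif (cultura[0] > 100 and cultura[0] <= 125) or (autonomia[0] > 100 and autonomia[0] <= 125): #101-125 = nivel 5
--     return [5] + RevisarValoresNivel(cultura[1:], autonomia[1:])
--   elif (cultura[0] > 125 and cultura[0] <= 150) or (autonomia[0] > 125 and autonomia[0] <= 150): #126-150 = nivel 6
--     return [6] + RevisarValoresNivel(cultura[1:], autonomia[1:])
--   elif (cultura[0] > 150 and cultura[0] <= 175) or (autonomia[0] > 150 and autonomia[0] <= 175): #151-175 = nivel 7
--     return [7] + RevisarValoresNivel(cultura[1:], autonomia[1:])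
--   elif (cultura[0] > 175 and cultura[0] <= 200) or (autonomia[0] > 175 and autonomia[0] <= 200): #176-200 = nivel 8
--     return [8] + RevisarValoresNivel(cultura[1:], autonomia[1:])
--   else:  #200+ = nivel 9
--     return [9] + RevisarValoresNivel(cultura[1:], autonomia[1:])
-- ===== SOURCE B (Python) =====
-- def RevisarValoresNivel(cultura, autonomia):
--     def nivel(x):
--         if x == 0:
--             return 0
--         if 0 < x <= 200:
--             return (x + 24) // 25
--         return 9
--     return [min(nivel(c), nivel(a)) for c, a in zip(cultura, autonomia)]
-- ===== Notes on version B (the rewrite author's own statement) =====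
-- stated objective: faster
-- what changed: Replaces the 10-branch recursive threshold cascade over list slices (quadratic from repeated slicing) with a single linear pass over the zipped lists computing each level in closed form as min of per-value buckets via ceiling division.
-- outside the precondition, e.g. on RevisarValoresNivel([0], []): A returns [0], B returns []
import Mathlib
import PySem

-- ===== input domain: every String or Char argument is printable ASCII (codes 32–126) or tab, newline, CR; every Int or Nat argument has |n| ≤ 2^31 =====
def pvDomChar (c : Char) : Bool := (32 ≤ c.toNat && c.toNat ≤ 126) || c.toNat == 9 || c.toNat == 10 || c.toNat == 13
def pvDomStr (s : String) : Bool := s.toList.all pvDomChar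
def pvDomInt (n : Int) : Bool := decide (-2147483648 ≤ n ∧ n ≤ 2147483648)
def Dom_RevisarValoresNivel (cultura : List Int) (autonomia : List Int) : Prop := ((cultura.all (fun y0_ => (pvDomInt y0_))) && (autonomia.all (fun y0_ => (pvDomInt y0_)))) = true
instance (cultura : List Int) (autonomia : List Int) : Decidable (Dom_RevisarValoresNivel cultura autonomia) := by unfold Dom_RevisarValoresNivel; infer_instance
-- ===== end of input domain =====

-- B replaces A's 10-branch recursive threshold cascade over list slices with one linear
-- pass over the zipped lists, computing each level as min of per-value buckets (ceiling division): faster (asymptotic).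


-- ===== PORT A =====
-- Literal port of A: recursion with the same ordered if/elif cascade; the '| _, _' arm is
-- where Python raises IndexError (one list empty, the other not) — excluded by Pre_.
def RevisarValoresNivel : List Int → List Int → List Int
  | [], [] => []
  | c :: cs, a :: as' =>
      if c = 0 ∨ a = 0 then 0 :: RevisarValoresNivel cs as'
      else if (c > 0 ∧ c ≤ 25) ∨ (a > 0 ∧ a ≤ 25) then 1 :: RevisarValoresNivel cs as'
      else if (c > 25 ∧ c ≤ 50) ∨ (a > 25 ∧ a ≤ 50) then 2 :: RevisarValoresNivel cs as'
      else if (c > 50 ∧ c ≤ 75) ∨ (a > 50 ∧ a ≤ 75) then 3 :: RevisarValoresNivel cs as'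
      else if (c > 75 ∧ c ≤ 100) ∨ (a > 75 ∧ a ≤ 100) then 4 :: RevisarValoresNivel cs as'
      else if (c > 100 ∧ c ≤ 125) ∨ (a > 100 ∧ a ≤ 125) then 5 :: RevisarValoresNivel cs as'
      else if (c > 125 ∧ c ≤ 150) ∨ (a > 125 ∧ a ≤ 150) then 6 :: RevisarValoresNivel cs as'
      else if (c > 150 ∧ c ≤ 175) ∨ (a > 150 ∧ a ≤ 175) then 7 :: RevisarValoresNivel cs as'
      else if (c > 175 ∧ c ≤ 200) ∨ (a > 175 ∧ a ≤ 200) then 8 :: RevisarValoresNivel cs as'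
      else 9 :: RevisarValoresNivel cs as'
  | _, _ => []

-- ===== PORT B =====
-- Source B's helper nivel(x)
def pvNivel (x : Int) : Int :=
  if x = 0 then 0
  else if 0 < x ∧ x ≤ 200 then PySem.Int.floordiv (x + 24) 25
  else 9

def RevisarValoresNivel_alt (cultura : List Int) (autonomia : List Int) : List Int :=
  (cultura.zip autonomia).map (fun p => min (pvNivel p.1) (pvNivel p.2))

-- ===== PRECONDITION & SPEC =====
-- Pre_ excludes unequal-length lists: there A almost always raises IndexError, and in the
-- remaining accidental corner (the longer list's remainder starts with 0 while the other is
-- already empty) the padded value A returns is an artefact of its short-circuit evaluation.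
def Pre_RevisarValoresNivel (cultura : List Int) (autonomia : List Int) : Prop :=
  cultura.length = autonomia.length
instance (cultura : List Int) (autonomia : List Int) : Decidable (Pre_RevisarValoresNivel cultura autonomia) := by unfold Pre_RevisarValoresNivel; infer_instance
def pvWitness_RevisarValoresNivel : List Int × List Int := ([0, 13, 210, -4], [30, 13, 77, 5])

def Spec_RevisarValoresNivel (cultura : List Int) (autonomia : List Int) (out : List Int) : Prop := out = RevisarValoresNivel_alt cultura autonomia
instance (cultura : List Int) (autonomia : List Int) (out : List Int) : Decidable (Spec_RevisarValoresNivel cultura autonomia out) := by unfold Spec_RevisarValoresNivel; infer_instance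

-- ===== CLAIM (what is proved, stated in full; the proofs are below) =====
def Claim_equal_RevisarValoresNivel : Prop := ∀ (cultura : List Int) (autonomia : List Int), Dom_RevisarValoresNivel cultura autonomia → Pre_RevisarValoresNivel cultura autonomia → Spec_RevisarValoresNivel cultura autonomia (RevisarValoresNivel cultura autonomia)

-- ===== LEMMAS AND PROOFS =====

-- A's cascade on one pair equals min of Source B's buckets.
lemma pvHead_eq (c a : Int) :
    (if c = 0 ∨ a = 0 then (0 : Int)
     else if (c > 0 ∧ c ≤ 25) ∨ (a > 0 ∧ a ≤ 25) then 1
     else if (c > 25 ∧ c ≤ 50) ∨ (a > 25 ∧ a ≤ 50) then 2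
     else if (c > 50 ∧ c ≤ 75) ∨ (a > 50 ∧ a ≤ 75) then 3
     else if (c > 75 ∧ c ≤ 100) ∨ (a > 75 ∧ a ≤ 100) then 4
     else if (c > 100 ∧ c ≤ 125) ∨ (a > 100 ∧ a ≤ 125) then 5
     else if (c > 125 ∧ c ≤ 150) ∨ (a > 125 ∧ a ≤ 150) then 6
     else if (c > 150 ∧ c ≤ 175) ∨ (a > 150 ∧ a ≤ 175) then 7
     else if (c > 175 ∧ c ≤ 200) ∨ (a > 175 ∧ a ≤ 200) then 8
     else 9) = min (pvNivel c) (pvNivel a) := by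
  simp only [pvNivel, min_def,
    PySem.Int.floordiv_eq_ediv_of_pos (show (0:Int) < 25 by norm_num)]
  split_ifs <;> omega

lemma pvMain (cultura autonomia : List Int)
    (h : cultura.length = autonomia.length) :
    RevisarValoresNivel cultura autonomia = RevisarValoresNivel_alt cultura autonomia := by
  induction cultura generalizing autonomia with
  | nil =>
    cases autonomia with
    | nil => rfl
    | cons a as' => simp at h
  | cons c cs ih =>
    cases autonomia with
    | nil => simp at h
    | cons a as' =>
      simp only [List.length_cons, Nat.add_right_cancel_iff] at h
      have tail := ih as' h
      simp only [RevisarValoresNivel, RevisarValoresNivel_alt, List.zip_cons_cons,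
        List.map_cons] at tail ⊢
      rw [← pvHead_eq c a]
      split_ifs <;> simp [tail]

-- ===== VERDICT (by name: the statement is the Claim_ definition above) =====
theorem RevisarValoresNivel_spec : Claim_equal_RevisarValoresNivel := by
  intro cultura autonomia _ hpre
  exact pvMain cultura autonomia hpre
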